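-- pv_equiv track=rewrite | github.com/edisonlv/pdf-splitter | pdf_splitter_tkinter_new.py | process_single_mode
-- ===== SOURCE A (Python) =====
-- def process_single_mode(regions):
--     """处理单区域模式的页面分组"""
--     documents = []
--     current_group = []
--     last_page_number = None
--
--     # 按页面索引排序
--     sorted_regions = sorted(regions, key=lambda x: x['page'])
--
--     for region in sorted_regions:
--         current_number = region['current_page']
--
--         # 如果是第一个页码或者页码序列断开（重新从1开始），创建新组
--         if last_page_number is None or current_number == 1:
--             if current_group:
--                 start_page = current_group[0]['page']
--                 end_page = current_group[-1]['page']
--                 page_numbers = [r['current_page'] for r in current_group]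
--                 documents.append((start_page, end_page, page_numbers))
--             current_group = [region]
--         else:
--             current_group.append(region)
--
--         last_page_number = current_number
--
--     # 处理最后一组
--     if current_group:
--         start_page = current_group[0]['page']
--         end_page = current_group[-1]['page']
--         page_numbers = [r['current_page'] for r in current_group]
--         documents.append((start_page, end_page, page_numbers))
--
--     return documents
-- ===== SOURCE B (Python) =====
-- def process_single_mode(regions):
--     """Split the page-sorted regions at every current_page==1 reset into maximal
--     segments, then build one document tuple per segment."""
--     srt = sorted(regions, key=lambda x: x['page'])
--     segments = []
--     rest = srt
--     while rest:
--         i = 1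
--         while i < len(rest) and rest[i]['current_page'] != 1:
--             i += 1
--         segments.append(rest[:i])
--         rest = rest[i:]
--     return [(s[0]['page'], s[-1]['page'], [r['current_page'] for r in s])
--             for s in segments]
-- ===== Notes on version B (the rewrite author's own statement) =====
-- stated objective: alternative
-- what changed: Replaces A's single accumulator loop carrying (documents, current_group, last_page_number) by repeatedly cutting the sorted list at the next current_page==1 reset into maximal segments and then mapping each segment to its document tuple in a separate pass.
import Mathlib
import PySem

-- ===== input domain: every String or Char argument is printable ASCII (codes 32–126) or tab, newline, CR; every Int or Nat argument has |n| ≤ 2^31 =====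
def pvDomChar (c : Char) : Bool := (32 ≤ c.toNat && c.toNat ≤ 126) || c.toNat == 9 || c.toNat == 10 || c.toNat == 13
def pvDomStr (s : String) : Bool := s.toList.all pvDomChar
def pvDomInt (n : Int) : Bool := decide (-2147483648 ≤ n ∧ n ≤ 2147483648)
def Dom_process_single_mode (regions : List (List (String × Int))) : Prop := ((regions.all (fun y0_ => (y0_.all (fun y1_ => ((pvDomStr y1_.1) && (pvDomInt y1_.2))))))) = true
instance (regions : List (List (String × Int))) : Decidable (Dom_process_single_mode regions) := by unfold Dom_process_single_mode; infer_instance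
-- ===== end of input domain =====

-- B replaces A's one-pass accumulator loop by cutting the sorted list into maximal
-- segments at each current_page==1 reset and mapping each segment to its tuple
-- (objective: alternative decomposition, same cost).

-- shared helpers: dict lookups r['page'] / r['current_page'] (association list, first match;
-- Pre_ guarantees the key is present, so the .getD default is never used)
def pvPage (r : List (String × Int)) : Int := (List.lookup "page" r).getD 0
def pvCur (r : List (String × Int)) : Int := (List.lookup "current_page" r).getD 0

-- ===== PORT A =====
-- A's emission of current_group as a document (the 'if current_group:' block)
def pvEmitA (g : List (List (String × Int))) : List (Int × Int × List Int) :=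
  if g.isEmpty then []
  else [((g.head?.map pvPage).getD 0, (g.getLast?.map pvPage).getD 0, g.map pvCur)]

-- one iteration of A's for-loop over (documents, current_group, last_page_number)
def pvStepA (st : List (Int × Int × List Int) × List (List (String × Int)) × Option Int)
    (r : List (String × Int)) :
    List (Int × Int × List Int) × List (List (String × Int)) × Option Int :=
  let n := pvCur r
  if st.2.2 = none ∨ n = 1 then (st.1 ++ pvEmitA st.2.1, [r], some n)
  else (st.1, st.2.1 ++ [r], some n)

def process_single_mode (regions : List (List (String × Int))) : List (Int × Int × List Int) :=
  let sorted_regions := PySem.List.sorted regions (fun x => pvPage x) false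
  let st := sorted_regions.foldl pvStepA ([], [], none)
  st.1 ++ pvEmitA st.2.1

-- ===== PORT B =====
-- Source B's while-loop: peel off the maximal segment rest[:i] (i = first later reset), recurse on rest[i:]
def pvSegs : List (List (String × Int)) → List (List (List (String × Int)))
  | [] => []
  | x :: xs =>
      (x :: xs.takeWhile (fun r => pvCur r != 1)) :: pvSegs (xs.dropWhile (fun r => pvCur r != 1))
termination_by l => l.length
decreasing_by simpa using Nat.lt_succ_of_le (List.length_dropWhile_le _ _)

-- Source B's comprehension body (s[0], s[-1]; segments are nonempty, so the [] case is unreachable)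
def pvMkDoc (s : List (List (String × Int))) : Int × Int × List Int :=
  match s with
  | [] => (0, 0, [])
  | h :: t => (pvPage h, pvPage ((h :: t).getLast (by simp)), (h :: t).map pvCur)

def process_single_mode_alt (regions : List (List (String × Int))) : List (Int × Int × List Int) :=
  let srt := PySem.List.sorted regions (fun x => pvPage x) false
  (pvSegs srt).map pvMkDoc

-- ===== PRECONDITION & SPEC =====
-- Pre_ excludes exactly the inputs where A raises KeyError: a region missing the
-- 'page' or 'current_page' key.
def Pre_process_single_mode (regions : List (List (String × Int))) : Prop :=
  (regions.all (fun r => (List.lookup "page" r).isSome && (List.lookup "current_page" r).isSome)) = true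
instance (regions : List (List (String × Int))) : Decidable (Pre_process_single_mode regions) := by unfold Pre_process_single_mode; infer_instance

def pvWitness_process_single_mode : (List (List (String × Int))) :=
  [[("page", 3), ("current_page", 1)], [("page", 1), ("current_page", 1)], [("page", 2), ("current_page", 2)]]

def Spec_process_single_mode (regions : List (List (String × Int))) (out : List (Int × Int × List Int)) : Prop := out = process_single_mode_alt regions
instance (regions : List (List (String × Int))) (out : List (Int × Int × List Int)) : Decidable (Spec_process_single_mode regions out) := by unfold Spec_process_single_mode; infer_instance

-- ===== CLAIM (what is proved, stated in full; the proofs are below) =====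
def Claim_equal_process_single_mode : Prop := ∀ (regions : List (List (String × Int))), Dom_process_single_mode regions → Pre_process_single_mode regions → Spec_process_single_mode regions (process_single_mode regions)

-- ===== LEMMAS AND PROOFS =====

-- a nonempty group is emitted exactly as B builds its document tuple
theorem pvEmitA_cons (h : List (String × Int)) (t : List (List (String × Int))) :
    pvEmitA (h :: t) = [pvMkDoc (h :: t)] := by
  simp [pvEmitA, pvMkDoc, List.getLast?_eq_some_getLast]

-- loop invariant: running A's loop with a nonempty current group g and last ≠ None
-- appends exactly the segments that B cuts out of (g ++ l)
theorem pvLoop (l : List (List (String × Int))) :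
    ∀ (docs : List (Int × Int × List Int)) (g : List (List (String × Int))), g ≠ [] →
      ∀ (last : Int),
      (l.foldl pvStepA (docs, g, some last)).1 ++ pvEmitA (l.foldl pvStepA (docs, g, some last)).2.1
        = docs ++ (((g ++ l.takeWhile (fun r => pvCur r != 1))
            :: pvSegs (l.dropWhile (fun r => pvCur r != 1))).map pvMkDoc) := by
  induction l with
  | nil =>
      intro docs g hg last
      obtain ⟨h, t, rfl⟩ := List.exists_cons_of_ne_nil hg
      simp [pvSegs, pvEmitA_cons]
  | cons r rest ih =>
      intro docs g hg last
      obtain ⟨h, t, rfl⟩ := List.exists_cons_of_ne_nil hg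
      by_cases h1 : pvCur r = 1
      · have : pvStepA (docs, h :: t, some last) r
            = (docs ++ pvEmitA (h :: t), [r], some (pvCur r)) := by
          simp [pvStepA, h1]
        rw [List.foldl_cons, this, ih _ [r] (by simp) _]
        simp [List.takeWhile, List.dropWhile, h1, pvSegs, pvEmitA_cons]
      · have : pvStepA (docs, h :: t, some last) r
            = (docs, (h :: t) ++ [r], some (pvCur r)) := by
          simp [pvStepA, h1]
        have hb : (pvCur r != 1) = true := by simp [h1]
        rw [List.foldl_cons, this, ih _ ((h :: t) ++ [r]) (by simp) _]
        simp [List.takeWhile, List.dropWhile, hb]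

-- ===== VERDICT (by name: the statement is the Claim_ definition above) =====
theorem process_single_mode_spec : Claim_equal_process_single_mode := by
  intro regions _ _
  unfold Spec_process_single_mode
  cases hs : PySem.List.sorted regions (fun x => pvPage x) false with
  | nil => simp [process_single_mode, process_single_mode_alt, hs, pvSegs, pvEmitA]
  | cons x xs =>
      have h0 : pvStepA ([], [], none) x = ([], [x], some (pvCur x)) := by
        simp [pvStepA, pvEmitA]
      simp only [process_single_mode, process_single_mode_alt, hs]
      rw [List.foldl_cons, h0, pvLoop xs [] [x] (by simp) (pvCur x)]
      simp [pvSegs]
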